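-- pv_equiv track=rewrite | github.com/amuif/LeetCode | 1493-longest-subarray-of-1s-after-deleting-one-element/1493-longest-subarray-of-1s-after-deleting-one-element.py | find
-- ===== SOURCE A (Python) =====
-- def find(nums,guess):
--   start = 0
--   end = start + guess
--   s = sum(nums[start:end])
--
--   while end < len(nums):
--
--     l = end - start
--     if (l-s) <= 1:
--       return s
--
--     s-=nums[start]
--     start+=1
--
--     s+=nums[end]
--     end+=1
--
--   l = end - start
--   if (l-s) <= 1:
--     return s
--
--   return -1
-- ===== SOURCE B (Python) =====
-- def find(nums, guess):
--     pref = [0]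
--     for x in nums:
--         pref.append(pref[-1] + x)
--     n = len(nums)
--     if guess >= n:
--         # window longer than (or equal to) the whole array: one truncated window
--         total = pref[n]
--         return total if guess - total <= 1 else -1
--     for lo, hi in zip(pref, pref[guess:]):
--         ones = hi - lo
--         if guess - ones <= 1:
--             return ones
--     return -1
-- ===== Notes on version B (the rewrite author's own statement) =====
-- stated objective: alternative
-- what changed: Replaces A's do-while sliding window with an incrementally maintained running sum by a precomputed prefix-sum table: each window's ones count is read off as a difference of two prefix sums from a zip of the table with its guess-shifted tail.
-- outside the precondition, e.g. on find([-3, -1, 2], -2): A returns -3, B returns 1; on find([-3, -3, -3], -1): A raises IndexError, B returns -1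
import Mathlib
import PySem

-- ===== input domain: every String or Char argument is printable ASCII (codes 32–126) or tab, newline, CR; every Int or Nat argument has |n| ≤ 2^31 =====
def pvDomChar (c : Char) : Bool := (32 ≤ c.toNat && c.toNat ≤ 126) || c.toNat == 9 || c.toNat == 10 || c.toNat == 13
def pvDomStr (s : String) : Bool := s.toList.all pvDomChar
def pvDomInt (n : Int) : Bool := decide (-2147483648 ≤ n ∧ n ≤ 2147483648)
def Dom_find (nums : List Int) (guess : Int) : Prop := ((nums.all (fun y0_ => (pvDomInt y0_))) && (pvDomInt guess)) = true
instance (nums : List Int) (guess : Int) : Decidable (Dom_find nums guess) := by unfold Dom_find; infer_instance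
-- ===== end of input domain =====

-- B replaces A's do-while sliding window (incrementally maintained running sum) by a
-- precomputed prefix-sum table: each window's ones count is a difference of two prefix
-- sums, read off a zip of the table with its guess-shifted tail. Same cost, different shape.

-- ===== PORT A =====
-- A's while-loop; state (start, end, s).  nums[start]/nums[end] via pyGet?.getD 0:
-- inside Pre_find (0 ≤ guess) every index A actually reads is in range, so the default never fires.
def findLoop (nums : List Int) (start endI s : Int) : Int :=
  if endI < (nums.length : Int) then
    if (endI - start) - s ≤ 1 then s
    else findLoop nums (start + 1) (endI + 1)
      (s - (PySem.List.pyGet? nums start).getD 0 + (PySem.List.pyGet? nums endI).getD 0)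
  else if (endI - start) - s ≤ 1 then s else -1
termination_by ((nums.length : Int) - endI).toNat
decreasing_by omega

def find (nums : List Int) (guess : Int) : Int :=
  findLoop nums 0 (0 + guess) (PySem.List.slice nums (some 0) (some (0 + guess))).sum

-- ===== PORT B =====
-- the pref-building loop: pref[-1] is the running accumulator, each step appends acc + x
def prefLoop (acc : Int) : List Int → List Int
  | [] => []
  | x :: xs => (acc + x) :: prefLoop (acc + x) xs

-- B's for-loop over the zipped pairs; early return modelled by recursion on the pairs
def scanZip (guess : Int) : List (Int × Int) → Int
  | [] => -1
  | (lo, hi) :: rest =>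
    let ones := hi - lo
    if guess - ones ≤ 1 then ones else scanZip guess rest

def find_alt (nums : List Int) (guess : Int) : Int :=
  let pref := 0 :: prefLoop 0 nums
  let n : Int := (nums.length : Int)
  if n ≤ guess then
    let total := (PySem.List.pyGet? pref n).getD 0   -- pref[n], always in range
    if guess - total ≤ 1 then total else -1
  else
    scanZip guess (pref.zip (PySem.List.slice pref (some guess) none))

-- ===== PRECONDITION & SPEC =====
-- Pre_ excludes guess < 0, where A's window end index is negative so A reads nums[end] by
-- Python negative-index wraparound (raising IndexError once end < -len(nums)) — an accident
-- of the implementation no caller of this window search would specify; B returns the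
-- natural answer of its prefix-sum scan there.
def Pre_find (nums : List Int) (guess : Int) : Prop := 0 ≤ guess
instance (nums : List Int) (guess : Int) : Decidable (Pre_find nums guess) := by unfold Pre_find; infer_instance
def pvWitness_find : List Int × Int := ([1, 0, 1, 1, 0, 1], 4)
def Spec_find (nums : List Int) (guess : Int) (out : Int) : Prop := out = find_alt nums guess
instance (nums : List Int) (guess : Int) (out : Int) : Decidable (Spec_find nums guess out) := by unfold Spec_find; infer_instance

-- ===== CLAIM (what is proved, stated in full; the proofs are below) =====
def Claim_equal_find : Prop := ∀ (nums : List Int) (guess : Int), Dom_find nums guess → Pre_find nums guess → Spec_find nums guess (find nums guess)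

-- ===== LEMMAS AND PROOFS =====

-- window sum, Nat indices
def winsum (nums : List Int) (g i : Nat) : Int := ((nums.drop i).take g).sum

lemma slice_winsum (nums : List Int) (g i : Nat) :
    (PySem.List.slice nums (some (i : Int)) (some ((i : Int) + (g : Int)))).sum = winsum nums g i := by
  rw [PySem.List.slice_natCast_add]; rfl

-- sliding the window one step to the right
lemma winsum_shift (nums : List Int) (g i : Nat) (h : i + g < nums.length) :
    winsum nums g i - nums[i]'(by omega) + nums[i + g]'h = winsum nums g (i + 1) := by
  induction g generalizing i with
  | zero => simp [winsum]
  | succ g ih =>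
    have hd : nums.drop i = nums[i]'(by omega) :: nums.drop (i + 1) :=
      List.drop_eq_getElem_cons (by omega)
    have hd' : nums.drop (i + 1) = nums[i+1]'(by omega) :: nums.drop (i + 2) :=
      List.drop_eq_getElem_cons (by omega)
    have hih := ih (i + 1) (by omega)
    simp only [winsum, hd, hd', List.take_succ_cons, List.sum_cons] at *
    have hidx : nums[i + 1 + g]'(by omega) = nums[i + (g + 1)]'(by omega) := by
      congr 1; omega
    rw [hidx] at hih
    linarith [hih]

lemma pyGetD_idx (nums : List Int) (i : Nat) (h : i < nums.length) :
    ((PySem.List.pyGet? nums (i : Int)).getD 0) = nums[i]'h := by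
  rw [PySem.List.pyGet?_natCast]
  simp [List.getElem?_eq_getElem h]

lemma prefLoop_length (acc : Int) (xs : List Int) : (prefLoop acc xs).length = xs.length := by
  induction xs generalizing acc with
  | nil => rfl
  | cons x t ih => simp [prefLoop, ih]

lemma prefs_get? (xs : List Int) (a : Int) (i : Nat) (h : i ≤ xs.length) :
    (a :: prefLoop a xs)[i]? = some (a + (xs.take i).sum) := by
  induction xs generalizing a i with
  | nil =>
    have hi : i = 0 := by simpa using h
    subst hi; simp
  | cons x t ih =>
    cases i with
    | zero => simp
    | succ j =>
      have : (a :: prefLoop a (x :: t))[j + 1]? = ((a + x) :: prefLoop (a + x) t)[j]? := by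
        simp [prefLoop]
      rw [this, ih (a + x) j (by simpa using h)]
      simp [add_assoc]

lemma pref_getElem (nums : List Int) (i : Nat) (h : i ≤ nums.length)
    (h' : i < (0 :: prefLoop 0 nums).length) :
    (0 :: prefLoop 0 nums)[i]'h' = (nums.take i).sum := by
  have := prefs_get? nums 0 i h
  rw [List.getElem?_eq_getElem h'] at this
  simpa using this

-- the window sum is a difference of two prefix sums
lemma winsum_pref (nums : List Int) (g i : Nat) (_h : i + g ≤ nums.length) :
    (nums.take (i + g)).sum - (nums.take i).sum = winsum nums g i := by
  rw [List.take_add, List.sum_append]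
  simp [winsum]

lemma pref_length (nums : List Int) : (0 :: prefLoop 0 nums).length = nums.length + 1 := by
  simp [prefLoop_length]

-- main loop invariant: A's slid loop from start i equals B's scan over the remaining zipped pairs
lemma loop_eq (nums : List Int) (g i : Nat) (h : i + g ≤ nums.length) :
    findLoop nums (i : Int) ((i : Int) + (g : Int)) (winsum nums g i)
      = scanZip (g : Int)
          (((0 :: prefLoop 0 nums).drop i).zip ((0 :: prefLoop 0 nums).drop (i + g))) := by
  have hlen : (0 :: prefLoop 0 nums).length = nums.length + 1 := pref_length nums
  have hdi : (0 :: prefLoop 0 nums).drop i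
      = ((0 :: prefLoop 0 nums)[i]'(by omega)) :: (0 :: prefLoop 0 nums).drop (i + 1) :=
    List.drop_eq_getElem_cons (by omega)
  have hdg : (0 :: prefLoop 0 nums).drop (i + g)
      = ((0 :: prefLoop 0 nums)[i + g]'(by omega)) :: (0 :: prefLoop 0 nums).drop (i + g + 1) :=
    List.drop_eq_getElem_cons (by omega)
  rw [hdi, hdg, List.zip_cons_cons]
  rw [findLoop]
  simp only [scanZip]
  have hones : ((0 :: prefLoop 0 nums)[i + g]'(by omega)) - ((0 :: prefLoop 0 nums)[i]'(by omega))
      = winsum nums g i := by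
    rw [pref_getElem nums (i + g) (by omega) (by omega), pref_getElem nums i (by omega) (by omega)]
    exact winsum_pref nums g i h
  have hcond : ((i : Int) + (g : Int) - (i : Int)) - winsum nums g i = (g : Int) - winsum nums g i := by
    ring_nf
  by_cases hlt : i + g < nums.length
  · have hlt' : (i : Int) + (g : Int) < (nums.length : Int) := by exact_mod_cast hlt
    rw [if_pos hlt', hcond, hones]
    by_cases hret : (g : Int) - winsum nums g i ≤ 1
    · simp [hret]
    · rw [if_neg hret, if_neg hret]
      have hs : winsum nums g i - (PySem.List.pyGet? nums (i : Int)).getD 0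
          + (PySem.List.pyGet? nums ((i : Int) + (g : Int))).getD 0 = winsum nums g (i + 1) := by
        rw [pyGetD_idx nums i (by omega)]
        have : ((i : Int) + (g : Int)) = ((i + g : Nat) : Int) := by push_cast; ring
        rw [this, pyGetD_idx nums (i + g) hlt]
        exact winsum_shift nums g i hlt
      have hrec := loop_eq nums g (i + 1) (by omega)
      have e1 : ((i : Int) + 1) = (((i + 1 : Nat)) : Int) := by push_cast; ring
      have e2 : ((i : Int) + (g : Int) + 1) = (((i + 1 : Nat)) : Int) + (g : Int) := by push_cast; ring
      have e3 : i + g + 1 = (i + 1) + g := by omega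
      rw [hs, e1, e2, e3, hrec]
  · -- last window: i + g = nums.length; the remaining zip is a singleton
    have hge : ¬ ((i : Int) + (g : Int) < (nums.length : Int)) := by
      intro hc; exact hlt (by exact_mod_cast hc)
    have hig : i + g = nums.length := by omega
    rw [if_neg hge, hcond, hones]
    have hnil : (0 :: prefLoop 0 nums).drop (i + g + 1) = [] := by
      apply List.drop_eq_nil_of_le; omega
    rw [hnil, List.zip_nil_right]
    by_cases hret : (g : Int) - winsum nums g i ≤ 1
    · simp [hret]
    · simp [hret, scanZip]
termination_by nums.length - i
decreasing_by omega

-- ===== VERDICT (by name: the statement is the Claim_ definition above) =====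
theorem find_spec : Claim_equal_find := by
  intro nums guess _ hpre
  have hg0 : (0 : Int) ≤ guess := hpre
  unfold Spec_find find find_alt
  by_cases hbig : (nums.length : Int) ≤ guess
  · -- guess ≥ len(nums): A skips the loop, B checks the single truncated window
    rw [if_pos hbig]
    rw [findLoop]
    have hnl : ¬ (0 + guess < (nums.length : Int)) := by omega
    rw [if_neg hnl]
    have hsum : (PySem.List.slice nums (some 0) (some (0 + guess))).sum = nums.sum := by
      have h0 : (PySem.List.slice nums (some 0) (some (0 + guess)))
          = nums.take (0 + guess).toNat := by
        rw [PySem.List.slice_zero_start, PySem.List.slice_to nums (by omega)]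
      rw [h0, List.take_of_length_le (by omega)]
    have htot : ((PySem.List.pyGet? (0 :: prefLoop 0 nums) ((nums.length : Int))).getD 0)
        = nums.sum := by
      rw [pyGetD_idx (0 :: prefLoop 0 nums) nums.length (by rw [pref_length]; omega)]
      rw [pref_getElem nums nums.length (le_refl _) (by rw [pref_length]; omega)]
      simp
    rw [hsum, htot]
    simp only [zero_add, sub_zero]
  · -- 0 ≤ guess < len(nums): the loop invariant at start 0
    obtain ⟨g, rfl⟩ : ∃ g : Nat, guess = (g : Int) := ⟨guess.toNat, by omega⟩
    rw [if_neg hbig]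
    have hinit : (PySem.List.slice nums (some 0) (some (0 + (g : Int)))).sum
        = winsum nums g 0 := by
      have : (0 : Int) + (g : Int) = ((0 : Nat) : Int) + ((g : Nat) : Int) := by omega
      rw [this]
      have h0 : (0 : Int) = ((0 : Nat) : Int) := rfl
      rw [h0]
      exact slice_winsum nums g 0
    have hslice : PySem.List.slice (0 :: prefLoop 0 nums) (some (g : Int)) none
        = (0 :: prefLoop 0 nums).drop g := by
      rw [PySem.List.slice_from _ hg0]
      simp
    rw [hinit, hslice]
    have := loop_eq nums g 0 (by omega)
    simp only [Nat.cast_zero, zero_add, List.drop_zero] at this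
    simpa using this
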